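-- pv_equiv track=rewrite | github.com/GWCCCS/chopsticks | fingers.py | format_player
-- ===== SOURCE A (Python) =====
-- MAX_FINGERS = 4
--
-- HANDS_STR = """         ▄▄▄▄▄L4
--  ░▒▓██████████▄L3
-- ░▒▓██████ L ███L2
--      ▀▀████████L1
--         ▀▀▀▀▀╵
--         ▄▄▄▄▄╷
--      ▄▄████████R1
-- ░▒▓██████ R ███R2
--  ░▒▓██████████▀R3
--          ▀▀▀▀▀R4"""
--
-- LH_FINGER = "▄▄▄▄╷"
--
-- RH_FINGER = "▀▀▀▀╵"
--
-- def format_player(lh_amt: int, rh_amt: int) -> str: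
--     """Format the L/R hands of a single player, with hands facing rightward.
--
--     :param lh_amt: The amount of fingers to lift on the LH.
--     :param rh_amt: The amount of fingers to lift on the RH.
--     :return:       The formatted string of the player's L/R hands.
--     """
--     hands_str = HANDS_STR # start with hands template str
--
--     # lift LH's fingers
--     for i in range(1, MAX_FINGERS+1):
--         replacement = LH_FINGER if lh_amt >= i else "" # choose to use a finger or a blank str
--         hands_str = hands_str.replace(f"L{i}", replacement) # make the replacement
--
--     # lift RH's fingers
--     for i in range(1, MAX_FINGERS+1):
--         replacement = RH_FINGER if rh_amt >= i else "" # choose to use a finger or a blank str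
--         hands_str = hands_str.replace(f"R{i}", replacement) # make the replacement
--
--     return hands_str
-- ===== SOURCE B (Python) =====
-- MAX_FINGERS = 4
--
-- HANDS_STR = """         ▄▄▄▄▄L4
--  ░▒▓██████████▄L3
-- ░▒▓██████ L ███L2
--      ▀▀████████L1
--         ▀▀▀▀▀╵
--         ▄▄▄▄▄╷
--      ▄▄████████R1
-- ░▒▓██████ R ███R2
--  ░▒▓██████████▀R3
--          ▀▀▀▀▀R4"""
--
-- LH_FINGER = "▄▄▄▄╷"
--
-- RH_FINGER = "▀▀▀▀╵"
--
-- def format_player(lh_amt: int, rh_amt: int) -> str: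
--     """Format the L/R hands of a single player, with hands facing rightward.
--
--     One pass over the template's lines: each line carrying a trailing
--     L<digit>/R<digit> marker gets the marker stripped and, when the relevant
--     hand lifts at least that many fingers, the finger string appended.
--     """
--     out_lines = []
--     for line in HANDS_STR.split("\n"):
--         if len(line) >= 2 and line[-2] in "LR" and line[-1].isdigit():
--             d = int(line[-1])
--             if 1 <= d <= MAX_FINGERS:
--                 amt = lh_amt if line[-2] == "L" else rh_amt
--                 finger = LH_FINGER if line[-2] == "L" else RH_FINGER
--                 line = line[:-2] + (finger if amt >= d else "")
--         out_lines.append(line)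
--     return "\n".join(out_lines)
-- ===== Notes on version B (the rewrite author's own statement) =====
-- stated objective: alternative
-- what changed: B makes a single pass over the template's lines, parsing each line's trailing L<digit>/R<digit> marker and appending the finger string when the hand's amount reaches the digit, instead of A's eight whole-string str.replace passes over the full template.
import Mathlib
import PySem

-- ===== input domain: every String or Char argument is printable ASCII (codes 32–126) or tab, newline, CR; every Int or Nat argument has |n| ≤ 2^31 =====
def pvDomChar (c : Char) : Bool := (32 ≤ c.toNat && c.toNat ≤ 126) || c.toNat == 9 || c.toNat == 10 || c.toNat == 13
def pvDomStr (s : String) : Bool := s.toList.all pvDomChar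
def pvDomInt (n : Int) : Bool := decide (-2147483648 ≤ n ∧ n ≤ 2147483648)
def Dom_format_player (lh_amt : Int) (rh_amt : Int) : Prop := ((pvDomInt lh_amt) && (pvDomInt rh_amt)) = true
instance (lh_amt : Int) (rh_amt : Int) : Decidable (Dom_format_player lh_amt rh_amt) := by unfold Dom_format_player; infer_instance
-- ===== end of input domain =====

-- B formats the hands in one pass over the template's lines, parsing each line's trailing L<digit>/R<digit> marker,
-- instead of A's eight whole-string replace passes (objective: alternative decomposition; same observable behaviour).

def pvMAX_FINGERS : Int := 4

def pvHANDS_STR : String := "         ▄▄▄▄▄L4\n ░▒▓██████████▄L3\n░▒▓██████ L ███L2\n     ▀▀████████L1\n        ▀▀▀▀▀╵\n        ▄▄▄▄▄╷\n     ▄▄████████R1\n░▒▓██████ R ███R2\n ░▒▓██████████▀R3\n         ▀▀▀▀▀R4"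

def pvLH_FINGER : String := "▄▄▄▄╷"

def pvRH_FINGER : String := "▀▀▀▀╵"

-- ===== PORT A =====
def format_player (lh_amt : Int) (rh_amt : Int) : String :=
  -- for i in range(1, MAX_FINGERS+1): hands_str = hands_str.replace(f"L{i}", LH_FINGER if lh_amt >= i else "")
  let hands_str :=
    (PySem.List.pyRange 1 (pvMAX_FINGERS + 1) 1).foldl
      (fun s i =>
        let replacement := if lh_amt ≥ i then pvLH_FINGER else ""
        PySem.Str.replace s (PySem.Str.join "" ["L", PySem.Int.toStr i]) replacement)
      pvHANDS_STR
  -- for i in range(1, MAX_FINGERS+1): hands_str = hands_str.replace(f"R{i}", RH_FINGER if rh_amt >= i else "")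
  (PySem.List.pyRange 1 (pvMAX_FINGERS + 1) 1).foldl
    (fun s i =>
      let replacement := if rh_amt ≥ i then pvRH_FINGER else ""
      PySem.Str.replace s (PySem.Str.join "" ["R", PySem.Int.toStr i]) replacement)
    hands_str

-- ===== PORT B =====
-- one line of Source B's loop body: parse the trailing marker, if any
def pvFormatLine (lh_amt : Int) (rh_amt : Int) (line : String) : String :=
  -- len(line) >= 2 and line[-2] in "LR" and line[-1].isdigit()  (pyGet? is none exactly when len(line) < 2)
  match PySem.Str.pyGet? line (-2), PySem.Str.pyGet? line (-1) with
  | some c2, some c1 =>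
    if ((c2 == 'L' || c2 == 'R') && PySem.Chars.isdigit c1) = true then
      -- d = int(line[-1]): exact for the isdigit-guarded single ASCII digit c1
      let d : Int := ((c1.toNat : Int) - 48)
      if 1 ≤ d ∧ d ≤ pvMAX_FINGERS then
        let amt := if c2 == 'L' then lh_amt else rh_amt
        let finger := if c2 == 'L' then pvLH_FINGER else pvRH_FINGER
        PySem.Str.join "" [PySem.Str.slice line none (some (-2)), if amt ≥ d then finger else ""]
      else line
    else line
  | _, _ => line

def format_player_alt (lh_amt : Int) (rh_amt : Int) : String :=
  -- HANDS_STR.split("\n"): the separator is nonempty, so split? is always some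
  let lines := (PySem.Str.split? pvHANDS_STR "\n").getD []
  let out_lines := lines.foldl (fun acc line => acc ++ [pvFormatLine lh_amt rh_amt line]) ([] : List String)
  PySem.Str.join "\n" out_lines

-- ===== PRECONDITION & SPEC =====
def Spec_format_player (lh_amt : Int) (rh_amt : Int) (out : String) : Prop := out = format_player_alt lh_amt rh_amt
instance (lh_amt : Int) (rh_amt : Int) (out : String) : Decidable (Spec_format_player lh_amt rh_amt out) := by unfold Spec_format_player; infer_instance

-- ===== CLAIM (what is proved, stated in full; the proofs are below) =====
def Claim_equal_format_player : Prop := ∀ (lh_amt : Int) (rh_amt : Int), Dom_format_player lh_amt rh_amt → Spec_format_player lh_amt rh_amt (format_player lh_amt rh_amt)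

-- ===== LEMMAS AND PROOFS =====

-- go acc lemma
theorem pvGoAcc (old new : List Char) : ∀ (fuel : Nat) (l acc : List Char),
    PySem.Chars.replace.go old new fuel l acc = acc.reverse ++ PySem.Chars.replace.go old new fuel l [] := by
  intro fuel
  induction fuel with
  | zero => intro l acc; simp [PySem.Chars.replace.go]
  | succ f ih =>
    intro l acc
    cases l with
    | nil => simp [PySem.Chars.replace.go]
    | cons c t =>
      simp only [PySem.Chars.replace.go]
      split_ifs with h
      · rw [ih _ (new.reverse ++ acc), ih _ (new.reverse ++ [])]
        simp
      · rw [ih t (c :: acc), ih t [c]]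
        simp

-- fuel irrelevance
theorem pvGoFuel (old new : List Char) (hold : old ≠ []) :
    ∀ (fuel fuel' : Nat) (l acc : List Char), l.length ≤ fuel → l.length ≤ fuel' →
    PySem.Chars.replace.go old new fuel l acc = PySem.Chars.replace.go old new fuel' l acc := by
  intro fuel
  induction fuel with
  | zero =>
    intro fuel' l acc h1 _
    have : l = [] := by cases l <;> simp_all
    subst this
    cases fuel' <;> simp [PySem.Chars.replace.go]
  | succ f ih =>
    intro fuel' l acc h1 h2
    cases l with
    | nil => cases fuel' <;> simp [PySem.Chars.replace.go]
    | cons c t =>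
      cases fuel' with
      | zero => simp at h2
      | succ f' =>
        simp only [PySem.Chars.replace.go]
        split_ifs with h
        · have hlen : old.length ≤ (c :: t).length := List.IsPrefix.length_le (List.isPrefixOf_iff_prefix.mp h)
          have hk : 1 ≤ old.length := by cases old <;> simp_all
          apply ih
          · simp only [List.length_drop]; simp at h1 ⊢; omega
          · simp only [List.length_drop]; simp at h2 ⊢; omega
        · apply ih <;> simp_all

-- boundary: a prefix-match cannot cross a char not in old
theorem pvPrefixBoundary (c : Char) :
    ∀ (old l rest : List Char), c ∉ old → old.isPrefixOf (l ++ c :: rest) = old.isPrefixOf l := by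
  intro old
  induction old with
  | nil => intros; simp [List.isPrefixOf]
  | cons a o ih =>
    intro l rest hc
    cases l with
    | nil =>
      have hac : (a == c) = false := by
        simp only [List.mem_cons, not_or] at hc
        simp only [beq_eq_false_iff_ne, ne_eq]
        exact fun h => hc.1 h.symm
      simp [List.isPrefixOf, hac]
    | cons b t =>
      simp only [List.cons_append, List.isPrefixOf]
      rw [ih t rest (by simp_all)]

theorem pvIc2 (sep x y : List Char) (ls : List (List Char)) :
    sep.intercalate (x :: y :: ls) = x ++ sep ++ sep.intercalate (y :: ls) := by
  simp [List.intercalate, List.intersperse]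

theorem pvIc1 (sep x : List Char) : sep.intercalate [x] = x := by
  simp [List.intercalate, List.intersperse]

-- one boundary step of the distribution
theorem pvGoSplit (old new rest : List Char) (hold : old ≠ []) (hnl : '\n' ∉ old) :
    ∀ (fuel : Nat) (l acc : List Char), l.length + 1 + rest.length ≤ fuel →
    PySem.Chars.replace.go old new fuel (l ++ '\n' :: rest) acc
      = acc.reverse ++ PySem.Chars.replace.go old new l.length l []
        ++ '\n' :: PySem.Chars.replace.go old new rest.length rest [] := by
  intro fuel
  induction fuel with
  | zero => intro l acc h; simp at h
  | succ f ih =>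
    intro l acc h
    cases l with
    | nil =>
      have hpre : old.isPrefixOf ('\n' :: rest) = false := by
        cases old with
        | nil => simp_all
        | cons a o =>
          simp only [List.isPrefixOf]
          have : (a == '\n') = false := by
            simp only [List.mem_cons, not_or] at hnl
            simp only [beq_eq_false_iff_ne, ne_eq]
            exact fun hh => hnl.1 hh.symm
          simp [this]
      simp only [List.nil_append, PySem.Chars.replace.go, hpre, Bool.false_eq_true, if_false]
      rw [pvGoAcc, pvGoFuel old new hold f rest.length rest []
            (by simp only [List.length_nil] at h; omega) le_rfl]
      simp [PySem.Chars.replace.go]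
    | cons c t =>
      have hb := pvPrefixBoundary '\n' old (c :: t) rest hnl
      rw [List.cons_append] at hb
      simp only [List.cons_append, PySem.Chars.replace.go]
      by_cases hp : old.isPrefixOf (c :: t) = true
      · rw [hb, hp]
        simp only [if_true]
        have hlen : old.length ≤ (c :: t).length := List.IsPrefix.length_le (List.isPrefixOf_iff_prefix.mp hp)
        have hk : 1 ≤ old.length := by cases old <;> simp_all
        have hdrop : List.drop old.length (c :: (t ++ '\n' :: rest))
            = List.drop old.length (c :: t) ++ '\n' :: rest := by
          rw [← List.cons_append, List.drop_append_of_le_length hlen]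
        rw [hdrop, ih (List.drop old.length (c :: t)) (new.reverse ++ acc)
              (by simp only [List.length_drop, List.length_cons] at h ⊢; omega)]
        have hstep : PySem.Chars.replace.go old new (c :: t).length (c :: t) []
             = new ++ PySem.Chars.replace.go old new (List.drop old.length (c :: t)).length (List.drop old.length (c :: t)) [] := by
          have h1 : (c :: t).length = ((c :: t).length - 1) + 1 := by simp
          rw [h1]
          simp only [PySem.Chars.replace.go, hp, if_true]
          rw [pvGoAcc, pvGoFuel old new hold ((c :: t).length - 1) (List.drop old.length (c :: t)).length
                (List.drop old.length (c :: t)) []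
                (by simp only [List.length_drop, List.length_cons]; omega) le_rfl]
          simp
        rw [hstep]
        simp
      · rw [hb]
        simp only [hp, Bool.false_eq_true, if_false]
        rw [ih t (c :: acc) (by simp only [List.length_cons] at h; omega)]
        have hstep : PySem.Chars.replace.go old new (c :: t).length (c :: t) []
             = c :: PySem.Chars.replace.go old new t.length t [] := by
          have h1 : (c :: t).length = t.length + 1 := by simp
          rw [h1]
          simp only [PySem.Chars.replace.go, hp, Bool.false_eq_true, if_false]
          rw [pvGoAcc]
          simp
        rw [hstep]
        simp

-- replace distributes over newline-joined parts
theorem pvReplaceJoin (old new : List Char) (hold : old ≠ []) (hnl : '\n' ∉ old) :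
    ∀ (parts : List (List Char)),
    PySem.Chars.replace (PySem.Chars.join ['\n'] parts) old new
      = PySem.Chars.join ['\n'] (parts.map (fun l => PySem.Chars.replace l old new)) := by
  have holdE : old.isEmpty = false := by cases old <;> simp_all
  intro parts
  induction parts with
  | nil => simp [PySem.Chars.join, List.intercalate, PySem.Chars.replace, holdE, PySem.Chars.replace.go]
  | cons l ls ih =>
    cases ls with
    | nil =>
      simp [PySem.Chars.join, pvIc1]
    | cons l2 ls' =>
      simp only [PySem.Chars.join, List.map] at ih ⊢
      rw [pvIc2, pvIc2, ← ih]
      simp only [PySem.Chars.replace, holdE, Bool.false_eq_true, if_false]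
      rw [List.append_assoc, List.singleton_append,
          pvGoSplit old new (['\n'].intercalate (l2 :: ls')) hold hnl _ l [] (by simp only [List.length_append, List.length_cons]; omega)]
      simp [List.append_assoc]

-- splitOn.go: a newline-free chunk followed by a separator
theorem pvSGo (rest : List Char) :
    ∀ (l cur : List Char) (acc : List (List Char)), '\n' ∉ l →
    PySem.Chars.splitOn.go ['\n'] (l.length + 1 + (rest.length + 1)) (l ++ '\n' :: rest) cur acc
      = PySem.Chars.splitOn.go ['\n'] (rest.length + 1) rest [] ((cur.reverse ++ l) :: acc) := by
  intro l
  induction l with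
  | nil =>
    intro cur acc _
    simp [PySem.Chars.splitOn.go, List.isPrefixOf, Nat.add_comm]
  | cons c t ih =>
    intro cur acc hc
    have hcnl : ('\n' == c) = false := by
      simp only [List.mem_cons, not_or] at hc
      simp only [beq_eq_false_iff_ne, ne_eq]
      exact hc.1
    simp only [List.length_cons, List.cons_append, PySem.Chars.splitOn.go, List.isPrefixOf, hcnl,
      Bool.false_and, Bool.false_eq_true, if_false]
    rw [show (t.length + 1 + 1).add rest.length = t.length + 1 + (rest.length + 1) from by simp only [Nat.add_eq]; omega]
    have := ih (c :: cur) acc (by simp_all)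
    simpa [List.append_assoc] using this

-- splitOn.go on a newline-free tail
theorem pvSGoLast :
    ∀ (fuel : Nat) (l cur : List Char) (acc : List (List Char)), l.length ≤ fuel → '\n' ∉ l →
    PySem.Chars.splitOn.go ['\n'] fuel l cur acc = (((cur.reverse ++ l) :: acc).reverse) := by
  intro fuel
  induction fuel with
  | zero => intro l cur acc h _; simp [PySem.Chars.splitOn.go]
  | succ f ih =>
    intro l cur acc h hl
    cases l with
    | nil => simp [PySem.Chars.splitOn.go]
    | cons c t =>
      have hcnl : ('\n' == c) = false := by
        simp only [List.mem_cons, not_or] at hl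
        simp only [beq_eq_false_iff_ne, ne_eq]
        exact hl.1
      simp only [PySem.Chars.splitOn.go, List.isPrefixOf, hcnl, Bool.false_and,
        Bool.false_eq_true, if_false]
      rw [ih t (c :: cur) acc (by simp at h; omega) (by simp_all)]
      simp

-- splitOn inverts the newline join
theorem pvSplitJoinAux :
    ∀ (ls : List (List Char)) (acc : List (List Char)), ls ≠ [] → (∀ l ∈ ls, '\n' ∉ l) →
    PySem.Chars.splitOn.go ['\n'] ((PySem.Chars.join ['\n'] ls).length + 1) (PySem.Chars.join ['\n'] ls) [] acc
      = acc.reverse ++ ls := by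
  intro ls
  induction ls with
  | nil => intro acc h _; simp at h
  | cons l ls' ih =>
    intro acc _ hnl
    cases ls' with
    | nil =>
      simp only [PySem.Chars.join, pvIc1]
      rw [pvSGoLast (l.length + 1) l [] acc (by omega) (hnl l (by simp))]
      simp
    | cons l2 ls'' =>
      simp only [PySem.Chars.join, pvIc2, List.append_assoc, List.singleton_append]
      have hlen : (l ++ '\n' :: ['\n'].intercalate (l2 :: ls'')).length + 1
          = l.length + 1 + ((['\n'].intercalate (l2 :: ls'')).length + 1) := by
        simp only [List.length_append, List.length_cons]; omega
      rw [hlen, pvSGo (['\n'].intercalate (l2 :: ls'')) l [] acc (hnl l (by simp))]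
      simp only [List.reverse_nil, List.nil_append]
      have := ih (l :: acc) (by simp) (by intro x hx; exact hnl x (by simp [hx]))
      simp only [PySem.Chars.join] at this
      rw [this]
      simp

theorem pvSplitJoin (ls : List (List Char)) (h0 : ls ≠ []) (hnl : ∀ l ∈ ls, '\n' ∉ l) :
    PySem.Chars.splitOn (PySem.Chars.join ['\n'] ls) ['\n'] = ls := by
  unfold PySem.Chars.splitOn
  rw [pvSplitJoinAux ls [] h0 hnl]
  simp

def pvLINES : List String := ["         ▄▄▄▄▄L4", " ░▒▓██████████▄L3", "░▒▓██████ L ███L2", "     ▀▀████████L1", "        ▀▀▀▀▀╵", "        ▄▄▄▄▄╷", "     ▄▄████████R1", "░▒▓██████ R ███R2", " ░▒▓██████████▀R3", "         ▀▀▀▀▀R4"]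

set_option maxRecDepth 40000 in
theorem pvHJoin : pvHANDS_STR = PySem.Str.join "\n" pvLINES := by decide

-- Str-level wrappers
theorem pvStrReplaceJoin (parts : List String) (old new : String)
    (h1 : old.toList ≠ []) (h2 : '\n' ∉ old.toList) :
    PySem.Str.replace (PySem.Str.join "\n" parts) old new
      = PySem.Str.join "\n" (parts.map (fun l => PySem.Str.replace l old new)) := by
  simp only [PySem.Str.replace, PySem.Str.join]
  rw [show ("\n" : String).toList = ['\n'] from rfl]
  simp only [String.toList_ofList]
  rw [pvReplaceJoin old.toList new.toList h1 h2]
  simp [Function.comp_def]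

theorem pvStrSplitJoin (parts : List String) (h0 : parts ≠ [])
    (hnl : ∀ l ∈ parts, '\n' ∉ l.toList) :
    PySem.Str.split? (PySem.Str.join "\n" parts) "\n" = some parts := by
  simp only [PySem.Str.split?, PySem.Str.join, PySem.Chars.split?]
  rw [show ("\n" : String).toList = ['\n'] from rfl]
  simp only [String.toList_ofList, List.isEmpty_cons, Bool.false_eq_true, if_false]
  rw [pvSplitJoin (parts.map String.toList) (by simp [h0]) (by simpa using hnl)]
  simp [Function.comp_def]

-- replace is the identity when the pattern does not occur
theorem pvGoNoMatch (old new : List Char) :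
    ∀ (fuel : Nat) (l acc : List Char), l.length ≤ fuel →
    (∀ i, old.isPrefixOf (l.drop i) = false) →
    PySem.Chars.replace.go old new fuel l acc = acc.reverse ++ l := by
  intro fuel
  induction fuel with
  | zero =>
    intro l acc h _
    simp [PySem.Chars.replace.go]
  | succ f ih =>
    intro l acc h hno
    cases l with
    | nil => simp [PySem.Chars.replace.go]
    | cons c t =>
      have h0 := hno 0
      simp only [List.drop_zero] at h0
      simp only [PySem.Chars.replace.go, h0, Bool.false_eq_true, if_false]
      rw [ih t (c :: acc) (by simp at h; omega) (fun i => by simpa using hno (i + 1))]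
      simp

theorem pvStrReplaceNoOcc (s old new : String)
    (h : ∀ i, old.toList.isPrefixOf (s.toList.drop i) = false) :
    PySem.Str.replace s old new = s := by
  simp only [PySem.Str.replace, PySem.Chars.replace]
  split_ifs with he
  · exfalso
    have := h s.toList.length
    simp at this he
    simp [he] at this
  · rw [pvGoNoMatch old.toList new.toList s.toList.length s.toList [] le_rfl h]
    simp

theorem pvStrReplaceNoOcc' (s old new : String) (hold : old.toList ≠ [])
    (h : ∀ i < s.toList.length, old.toList.isPrefixOf (s.toList.drop i) = false) :
    PySem.Str.replace s old new = s := by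
  apply pvStrReplaceNoOcc
  intro i
  by_cases hi : i < s.toList.length
  · exact h i hi
  · rw [List.drop_eq_nil_of_le (by omega)]
    cases hc : old.toList with
    | nil => exact absurd hc hold
    | cons a o => simp [List.isPrefixOf]


def pvG (lh_amt rh_amt : Int) (s : String) : String :=
  PySem.Str.replace (PySem.Str.replace (PySem.Str.replace (PySem.Str.replace
  (PySem.Str.replace (PySem.Str.replace (PySem.Str.replace (PySem.Str.replace s
    "L1" (if lh_amt ≥ 1 then pvLH_FINGER else ""))
    "L2" (if lh_amt ≥ 2 then pvLH_FINGER else ""))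
    "L3" (if lh_amt ≥ 3 then pvLH_FINGER else ""))
    "L4" (if lh_amt ≥ 4 then pvLH_FINGER else ""))
    "R1" (if rh_amt ≥ 1 then pvRH_FINGER else ""))
    "R2" (if rh_amt ≥ 2 then pvRH_FINGER else ""))
    "R3" (if rh_amt ≥ 3 then pvRH_FINGER else ""))
    "R4" (if rh_amt ≥ 4 then pvRH_FINGER else "")

theorem pvLineA_0 (lh rh : Int) :
    pvG lh rh "         ▄▄▄▄▄L4" = if lh ≥ 4 then "         ▄▄▄▄▄▄▄▄▄╷" else "         ▄▄▄▄▄" := by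
  unfold pvG
  by_cases h : lh ≥ (4 : Int)
  · simp only [h, if_true]
    rw [pvStrReplaceNoOcc' _ "L1" _ (by decide) (by decide)]
    rw [pvStrReplaceNoOcc' _ "L2" _ (by decide) (by decide)]
    rw [pvStrReplaceNoOcc' _ "L3" _ (by decide) (by decide)]
    rw [show PySem.Str.replace "         ▄▄▄▄▄L4" "L4" pvLH_FINGER = "         ▄▄▄▄▄▄▄▄▄╷" from by decide]
    rw [pvStrReplaceNoOcc' _ "R1" _ (by decide) (by decide)]
    rw [pvStrReplaceNoOcc' _ "R2" _ (by decide) (by decide)]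
    rw [pvStrReplaceNoOcc' _ "R3" _ (by decide) (by decide)]
    rw [pvStrReplaceNoOcc' _ "R4" _ (by decide) (by decide)]
  · simp only [h, if_false]
    rw [pvStrReplaceNoOcc' _ "L1" _ (by decide) (by decide)]
    rw [pvStrReplaceNoOcc' _ "L2" _ (by decide) (by decide)]
    rw [pvStrReplaceNoOcc' _ "L3" _ (by decide) (by decide)]
    rw [show PySem.Str.replace "         ▄▄▄▄▄L4" "L4" "" = "         ▄▄▄▄▄" from by decide]
    rw [pvStrReplaceNoOcc' _ "R1" _ (by decide) (by decide)]
    rw [pvStrReplaceNoOcc' _ "R2" _ (by decide) (by decide)]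
    rw [pvStrReplaceNoOcc' _ "R3" _ (by decide) (by decide)]
    rw [pvStrReplaceNoOcc' _ "R4" _ (by decide) (by decide)]

theorem pvLineB_0 (lh rh : Int) :
    pvFormatLine lh rh "         ▄▄▄▄▄L4" = if lh ≥ 4 then "         ▄▄▄▄▄▄▄▄▄╷" else "         ▄▄▄▄▄" := by
  unfold pvFormatLine
  rw [show PySem.Str.pyGet? "         ▄▄▄▄▄L4" (-2) = some 'L' from by decide]
  rw [show PySem.Str.pyGet? "         ▄▄▄▄▄L4" (-1) = some '4' from by decide]
  dsimp only
  rw [if_pos (show (('L' == 'L' || 'L' == 'R') && PySem.Chars.isdigit '4') = true from by decide)]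
  rw [show ((('4'.toNat : Int)) - 48 : Int) = (4 : Int) from by decide]
  rw [if_pos (show (1:Int) ≤ 4 ∧ (4:Int) ≤ pvMAX_FINGERS from by decide)]
  rw [if_pos (show (('L' == 'L') = true) from by decide)]
  rw [if_pos (show (('L' == 'L') = true) from by decide)]
  by_cases h : lh ≥ (4 : Int)
  · rw [if_pos h, if_pos h]
    decide
  · rw [if_neg h, if_neg h]
    decide

theorem pvLineA_1 (lh rh : Int) :
    pvG lh rh " ░▒▓██████████▄L3" = if lh ≥ 3 then " ░▒▓██████████▄▄▄▄▄╷" else " ░▒▓██████████▄" := by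
  unfold pvG
  by_cases h : lh ≥ (3 : Int)
  · simp only [h, if_true]
    rw [pvStrReplaceNoOcc' _ "L1" _ (by decide) (by decide)]
    rw [pvStrReplaceNoOcc' _ "L2" _ (by decide) (by decide)]
    rw [show PySem.Str.replace " ░▒▓██████████▄L3" "L3" pvLH_FINGER = " ░▒▓██████████▄▄▄▄▄╷" from by decide]
    rw [pvStrReplaceNoOcc' _ "L4" _ (by decide) (by decide)]
    rw [pvStrReplaceNoOcc' _ "R1" _ (by decide) (by decide)]
    rw [pvStrReplaceNoOcc' _ "R2" _ (by decide) (by decide)]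
    rw [pvStrReplaceNoOcc' _ "R3" _ (by decide) (by decide)]
    rw [pvStrReplaceNoOcc' _ "R4" _ (by decide) (by decide)]
  · simp only [h, if_false]
    rw [pvStrReplaceNoOcc' _ "L1" _ (by decide) (by decide)]
    rw [pvStrReplaceNoOcc' _ "L2" _ (by decide) (by decide)]
    rw [show PySem.Str.replace " ░▒▓██████████▄L3" "L3" "" = " ░▒▓██████████▄" from by decide]
    rw [pvStrReplaceNoOcc' _ "L4" _ (by decide) (by decide)]
    rw [pvStrReplaceNoOcc' _ "R1" _ (by decide) (by decide)]
    rw [pvStrReplaceNoOcc' _ "R2" _ (by decide) (by decide)]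
    rw [pvStrReplaceNoOcc' _ "R3" _ (by decide) (by decide)]
    rw [pvStrReplaceNoOcc' _ "R4" _ (by decide) (by decide)]

theorem pvLineB_1 (lh rh : Int) :
    pvFormatLine lh rh " ░▒▓██████████▄L3" = if lh ≥ 3 then " ░▒▓██████████▄▄▄▄▄╷" else " ░▒▓██████████▄" := by
  unfold pvFormatLine
  rw [show PySem.Str.pyGet? " ░▒▓██████████▄L3" (-2) = some 'L' from by decide]
  rw [show PySem.Str.pyGet? " ░▒▓██████████▄L3" (-1) = some '3' from by decide]
  dsimp only
  rw [if_pos (show (('L' == 'L' || 'L' == 'R') && PySem.Chars.isdigit '3') = true from by decide)]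
  rw [show ((('3'.toNat : Int)) - 48 : Int) = (3 : Int) from by decide]
  rw [if_pos (show (1:Int) ≤ 3 ∧ (3:Int) ≤ pvMAX_FINGERS from by decide)]
  rw [if_pos (show (('L' == 'L') = true) from by decide)]
  rw [if_pos (show (('L' == 'L') = true) from by decide)]
  by_cases h : lh ≥ (3 : Int)
  · rw [if_pos h, if_pos h]
    decide
  · rw [if_neg h, if_neg h]
    decide

theorem pvLineA_2 (lh rh : Int) :
    pvG lh rh "░▒▓██████ L ███L2" = if lh ≥ 2 then "░▒▓██████ L ███▄▄▄▄╷" else "░▒▓██████ L ███" := by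
  unfold pvG
  by_cases h : lh ≥ (2 : Int)
  · simp only [h, if_true]
    rw [pvStrReplaceNoOcc' _ "L1" _ (by decide) (by decide)]
    rw [show PySem.Str.replace "░▒▓██████ L ███L2" "L2" pvLH_FINGER = "░▒▓██████ L ███▄▄▄▄╷" from by decide]
    rw [pvStrReplaceNoOcc' _ "L3" _ (by decide) (by decide)]
    rw [pvStrReplaceNoOcc' _ "L4" _ (by decide) (by decide)]
    rw [pvStrReplaceNoOcc' _ "R1" _ (by decide) (by decide)]
    rw [pvStrReplaceNoOcc' _ "R2" _ (by decide) (by decide)]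
    rw [pvStrReplaceNoOcc' _ "R3" _ (by decide) (by decide)]
    rw [pvStrReplaceNoOcc' _ "R4" _ (by decide) (by decide)]
  · simp only [h, if_false]
    rw [pvStrReplaceNoOcc' _ "L1" _ (by decide) (by decide)]
    rw [show PySem.Str.replace "░▒▓██████ L ███L2" "L2" "" = "░▒▓██████ L ███" from by decide]
    rw [pvStrReplaceNoOcc' _ "L3" _ (by decide) (by decide)]
    rw [pvStrReplaceNoOcc' _ "L4" _ (by decide) (by decide)]
    rw [pvStrReplaceNoOcc' _ "R1" _ (by decide) (by decide)]
    rw [pvStrReplaceNoOcc' _ "R2" _ (by decide) (by decide)]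
    rw [pvStrReplaceNoOcc' _ "R3" _ (by decide) (by decide)]
    rw [pvStrReplaceNoOcc' _ "R4" _ (by decide) (by decide)]

theorem pvLineB_2 (lh rh : Int) :
    pvFormatLine lh rh "░▒▓██████ L ███L2" = if lh ≥ 2 then "░▒▓██████ L ███▄▄▄▄╷" else "░▒▓██████ L ███" := by
  unfold pvFormatLine
  rw [show PySem.Str.pyGet? "░▒▓██████ L ███L2" (-2) = some 'L' from by decide]
  rw [show PySem.Str.pyGet? "░▒▓██████ L ███L2" (-1) = some '2' from by decide]
  dsimp only
  rw [if_pos (show (('L' == 'L' || 'L' == 'R') && PySem.Chars.isdigit '2') = true from by decide)]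
  rw [show ((('2'.toNat : Int)) - 48 : Int) = (2 : Int) from by decide]
  rw [if_pos (show (1:Int) ≤ 2 ∧ (2:Int) ≤ pvMAX_FINGERS from by decide)]
  rw [if_pos (show (('L' == 'L') = true) from by decide)]
  rw [if_pos (show (('L' == 'L') = true) from by decide)]
  by_cases h : lh ≥ (2 : Int)
  · rw [if_pos h, if_pos h]
    decide
  · rw [if_neg h, if_neg h]
    decide

theorem pvLineA_3 (lh rh : Int) :
    pvG lh rh "     ▀▀████████L1" = if lh ≥ 1 then "     ▀▀████████▄▄▄▄╷" else "     ▀▀████████" := by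
  unfold pvG
  by_cases h : lh ≥ (1 : Int)
  · simp only [h, if_true]
    rw [show PySem.Str.replace "     ▀▀████████L1" "L1" pvLH_FINGER = "     ▀▀████████▄▄▄▄╷" from by decide]
    rw [pvStrReplaceNoOcc' _ "L2" _ (by decide) (by decide)]
    rw [pvStrReplaceNoOcc' _ "L3" _ (by decide) (by decide)]
    rw [pvStrReplaceNoOcc' _ "L4" _ (by decide) (by decide)]
    rw [pvStrReplaceNoOcc' _ "R1" _ (by decide) (by decide)]
    rw [pvStrReplaceNoOcc' _ "R2" _ (by decide) (by decide)]
    rw [pvStrReplaceNoOcc' _ "R3" _ (by decide) (by decide)]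
    rw [pvStrReplaceNoOcc' _ "R4" _ (by decide) (by decide)]
  · simp only [h, if_false]
    rw [show PySem.Str.replace "     ▀▀████████L1" "L1" "" = "     ▀▀████████" from by decide]
    rw [pvStrReplaceNoOcc' _ "L2" _ (by decide) (by decide)]
    rw [pvStrReplaceNoOcc' _ "L3" _ (by decide) (by decide)]
    rw [pvStrReplaceNoOcc' _ "L4" _ (by decide) (by decide)]
    rw [pvStrReplaceNoOcc' _ "R1" _ (by decide) (by decide)]
    rw [pvStrReplaceNoOcc' _ "R2" _ (by decide) (by decide)]
    rw [pvStrReplaceNoOcc' _ "R3" _ (by decide) (by decide)]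
    rw [pvStrReplaceNoOcc' _ "R4" _ (by decide) (by decide)]

theorem pvLineB_3 (lh rh : Int) :
    pvFormatLine lh rh "     ▀▀████████L1" = if lh ≥ 1 then "     ▀▀████████▄▄▄▄╷" else "     ▀▀████████" := by
  unfold pvFormatLine
  rw [show PySem.Str.pyGet? "     ▀▀████████L1" (-2) = some 'L' from by decide]
  rw [show PySem.Str.pyGet? "     ▀▀████████L1" (-1) = some '1' from by decide]
  dsimp only
  rw [if_pos (show (('L' == 'L' || 'L' == 'R') && PySem.Chars.isdigit '1') = true from by decide)]
  rw [show ((('1'.toNat : Int)) - 48 : Int) = (1 : Int) from by decide]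
  rw [if_pos (show (1:Int) ≤ 1 ∧ (1:Int) ≤ pvMAX_FINGERS from by decide)]
  rw [if_pos (show (('L' == 'L') = true) from by decide)]
  rw [if_pos (show (('L' == 'L') = true) from by decide)]
  by_cases h : lh ≥ (1 : Int)
  · rw [if_pos h, if_pos h]
    decide
  · rw [if_neg h, if_neg h]
    decide

theorem pvLineA_4 (lh rh : Int) : pvG lh rh "        ▀▀▀▀▀╵" = "        ▀▀▀▀▀╵" := by
  unfold pvG
  rw [pvStrReplaceNoOcc' _ "L1" _ (by decide) (by decide)]
  rw [pvStrReplaceNoOcc' _ "L2" _ (by decide) (by decide)]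
  rw [pvStrReplaceNoOcc' _ "L3" _ (by decide) (by decide)]
  rw [pvStrReplaceNoOcc' _ "L4" _ (by decide) (by decide)]
  rw [pvStrReplaceNoOcc' _ "R1" _ (by decide) (by decide)]
  rw [pvStrReplaceNoOcc' _ "R2" _ (by decide) (by decide)]
  rw [pvStrReplaceNoOcc' _ "R3" _ (by decide) (by decide)]
  rw [pvStrReplaceNoOcc' _ "R4" _ (by decide) (by decide)]

theorem pvLineB_4 (lh rh : Int) : pvFormatLine lh rh "        ▀▀▀▀▀╵" = "        ▀▀▀▀▀╵" := by
  unfold pvFormatLine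
  rw [show PySem.Str.pyGet? "        ▀▀▀▀▀╵" (-2) = some '▀' from by decide]
  rw [show PySem.Str.pyGet? "        ▀▀▀▀▀╵" (-1) = some '╵' from by decide]
  dsimp only
  rw [if_neg (show ¬ ((('▀' == 'L' || '▀' == 'R') && PySem.Chars.isdigit '╵') = true) from by decide)]

theorem pvLineA_5 (lh rh : Int) : pvG lh rh "        ▄▄▄▄▄╷" = "        ▄▄▄▄▄╷" := by
  unfold pvG
  rw [pvStrReplaceNoOcc' _ "L1" _ (by decide) (by decide)]
  rw [pvStrReplaceNoOcc' _ "L2" _ (by decide) (by decide)]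
  rw [pvStrReplaceNoOcc' _ "L3" _ (by decide) (by decide)]
  rw [pvStrReplaceNoOcc' _ "L4" _ (by decide) (by decide)]
  rw [pvStrReplaceNoOcc' _ "R1" _ (by decide) (by decide)]
  rw [pvStrReplaceNoOcc' _ "R2" _ (by decide) (by decide)]
  rw [pvStrReplaceNoOcc' _ "R3" _ (by decide) (by decide)]
  rw [pvStrReplaceNoOcc' _ "R4" _ (by decide) (by decide)]

theorem pvLineB_5 (lh rh : Int) : pvFormatLine lh rh "        ▄▄▄▄▄╷" = "        ▄▄▄▄▄╷" := by
  unfold pvFormatLine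
  rw [show PySem.Str.pyGet? "        ▄▄▄▄▄╷" (-2) = some '▄' from by decide]
  rw [show PySem.Str.pyGet? "        ▄▄▄▄▄╷" (-1) = some '╷' from by decide]
  dsimp only
  rw [if_neg (show ¬ ((('▄' == 'L' || '▄' == 'R') && PySem.Chars.isdigit '╷') = true) from by decide)]

theorem pvLineA_6 (lh rh : Int) :
    pvG lh rh "     ▄▄████████R1" = if rh ≥ 1 then "     ▄▄████████▀▀▀▀╵" else "     ▄▄████████" := by
  unfold pvG
  by_cases h : rh ≥ (1 : Int)
  · simp only [h, if_true]
    rw [pvStrReplaceNoOcc' _ "L1" _ (by decide) (by decide)]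
    rw [pvStrReplaceNoOcc' _ "L2" _ (by decide) (by decide)]
    rw [pvStrReplaceNoOcc' _ "L3" _ (by decide) (by decide)]
    rw [pvStrReplaceNoOcc' _ "L4" _ (by decide) (by decide)]
    rw [show PySem.Str.replace "     ▄▄████████R1" "R1" pvRH_FINGER = "     ▄▄████████▀▀▀▀╵" from by decide]
    rw [pvStrReplaceNoOcc' _ "R2" _ (by decide) (by decide)]
    rw [pvStrReplaceNoOcc' _ "R3" _ (by decide) (by decide)]
    rw [pvStrReplaceNoOcc' _ "R4" _ (by decide) (by decide)]
  · simp only [h, if_false]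
    rw [pvStrReplaceNoOcc' _ "L1" _ (by decide) (by decide)]
    rw [pvStrReplaceNoOcc' _ "L2" _ (by decide) (by decide)]
    rw [pvStrReplaceNoOcc' _ "L3" _ (by decide) (by decide)]
    rw [pvStrReplaceNoOcc' _ "L4" _ (by decide) (by decide)]
    rw [show PySem.Str.replace "     ▄▄████████R1" "R1" "" = "     ▄▄████████" from by decide]
    rw [pvStrReplaceNoOcc' _ "R2" _ (by decide) (by decide)]
    rw [pvStrReplaceNoOcc' _ "R3" _ (by decide) (by decide)]
    rw [pvStrReplaceNoOcc' _ "R4" _ (by decide) (by decide)]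

theorem pvLineB_6 (lh rh : Int) :
    pvFormatLine lh rh "     ▄▄████████R1" = if rh ≥ 1 then "     ▄▄████████▀▀▀▀╵" else "     ▄▄████████" := by
  unfold pvFormatLine
  rw [show PySem.Str.pyGet? "     ▄▄████████R1" (-2) = some 'R' from by decide]
  rw [show PySem.Str.pyGet? "     ▄▄████████R1" (-1) = some '1' from by decide]
  dsimp only
  rw [if_pos (show (('R' == 'L' || 'R' == 'R') && PySem.Chars.isdigit '1') = true from by decide)]
  rw [show ((('1'.toNat : Int)) - 48 : Int) = (1 : Int) from by decide]
  rw [if_pos (show (1:Int) ≤ 1 ∧ (1:Int) ≤ pvMAX_FINGERS from by decide)]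
  rw [if_neg (show ¬ (('R' == 'L') = true) from by decide)]
  rw [if_neg (show ¬ (('R' == 'L') = true) from by decide)]
  by_cases h : rh ≥ (1 : Int)
  · rw [if_pos h, if_pos h]
    decide
  · rw [if_neg h, if_neg h]
    decide

theorem pvLineA_7 (lh rh : Int) :
    pvG lh rh "░▒▓██████ R ███R2" = if rh ≥ 2 then "░▒▓██████ R ███▀▀▀▀╵" else "░▒▓██████ R ███" := by
  unfold pvG
  by_cases h : rh ≥ (2 : Int)
  · simp only [h, if_true]
    rw [pvStrReplaceNoOcc' _ "L1" _ (by decide) (by decide)]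
    rw [pvStrReplaceNoOcc' _ "L2" _ (by decide) (by decide)]
    rw [pvStrReplaceNoOcc' _ "L3" _ (by decide) (by decide)]
    rw [pvStrReplaceNoOcc' _ "L4" _ (by decide) (by decide)]
    rw [pvStrReplaceNoOcc' _ "R1" _ (by decide) (by decide)]
    rw [show PySem.Str.replace "░▒▓██████ R ███R2" "R2" pvRH_FINGER = "░▒▓██████ R ███▀▀▀▀╵" from by decide]
    rw [pvStrReplaceNoOcc' _ "R3" _ (by decide) (by decide)]
    rw [pvStrReplaceNoOcc' _ "R4" _ (by decide) (by decide)]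
  · simp only [h, if_false]
    rw [pvStrReplaceNoOcc' _ "L1" _ (by decide) (by decide)]
    rw [pvStrReplaceNoOcc' _ "L2" _ (by decide) (by decide)]
    rw [pvStrReplaceNoOcc' _ "L3" _ (by decide) (by decide)]
    rw [pvStrReplaceNoOcc' _ "L4" _ (by decide) (by decide)]
    rw [pvStrReplaceNoOcc' _ "R1" _ (by decide) (by decide)]
    rw [show PySem.Str.replace "░▒▓██████ R ███R2" "R2" "" = "░▒▓██████ R ███" from by decide]
    rw [pvStrReplaceNoOcc' _ "R3" _ (by decide) (by decide)]
    rw [pvStrReplaceNoOcc' _ "R4" _ (by decide) (by decide)]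

theorem pvLineB_7 (lh rh : Int) :
    pvFormatLine lh rh "░▒▓██████ R ███R2" = if rh ≥ 2 then "░▒▓██████ R ███▀▀▀▀╵" else "░▒▓██████ R ███" := by
  unfold pvFormatLine
  rw [show PySem.Str.pyGet? "░▒▓██████ R ███R2" (-2) = some 'R' from by decide]
  rw [show PySem.Str.pyGet? "░▒▓██████ R ███R2" (-1) = some '2' from by decide]
  dsimp only
  rw [if_pos (show (('R' == 'L' || 'R' == 'R') && PySem.Chars.isdigit '2') = true from by decide)]
  rw [show ((('2'.toNat : Int)) - 48 : Int) = (2 : Int) from by decide]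
  rw [if_pos (show (1:Int) ≤ 2 ∧ (2:Int) ≤ pvMAX_FINGERS from by decide)]
  rw [if_neg (show ¬ (('R' == 'L') = true) from by decide)]
  rw [if_neg (show ¬ (('R' == 'L') = true) from by decide)]
  by_cases h : rh ≥ (2 : Int)
  · rw [if_pos h, if_pos h]
    decide
  · rw [if_neg h, if_neg h]
    decide

theorem pvLineA_8 (lh rh : Int) :
    pvG lh rh " ░▒▓██████████▀R3" = if rh ≥ 3 then " ░▒▓██████████▀▀▀▀▀╵" else " ░▒▓██████████▀" := by
  unfold pvG
  by_cases h : rh ≥ (3 : Int)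
  · simp only [h, if_true]
    rw [pvStrReplaceNoOcc' _ "L1" _ (by decide) (by decide)]
    rw [pvStrReplaceNoOcc' _ "L2" _ (by decide) (by decide)]
    rw [pvStrReplaceNoOcc' _ "L3" _ (by decide) (by decide)]
    rw [pvStrReplaceNoOcc' _ "L4" _ (by decide) (by decide)]
    rw [pvStrReplaceNoOcc' _ "R1" _ (by decide) (by decide)]
    rw [pvStrReplaceNoOcc' _ "R2" _ (by decide) (by decide)]
    rw [show PySem.Str.replace " ░▒▓██████████▀R3" "R3" pvRH_FINGER = " ░▒▓██████████▀▀▀▀▀╵" from by decide]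
    rw [pvStrReplaceNoOcc' _ "R4" _ (by decide) (by decide)]
  · simp only [h, if_false]
    rw [pvStrReplaceNoOcc' _ "L1" _ (by decide) (by decide)]
    rw [pvStrReplaceNoOcc' _ "L2" _ (by decide) (by decide)]
    rw [pvStrReplaceNoOcc' _ "L3" _ (by decide) (by decide)]
    rw [pvStrReplaceNoOcc' _ "L4" _ (by decide) (by decide)]
    rw [pvStrReplaceNoOcc' _ "R1" _ (by decide) (by decide)]
    rw [pvStrReplaceNoOcc' _ "R2" _ (by decide) (by decide)]
    rw [show PySem.Str.replace " ░▒▓██████████▀R3" "R3" "" = " ░▒▓██████████▀" from by decide]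
    rw [pvStrReplaceNoOcc' _ "R4" _ (by decide) (by decide)]

theorem pvLineB_8 (lh rh : Int) :
    pvFormatLine lh rh " ░▒▓██████████▀R3" = if rh ≥ 3 then " ░▒▓██████████▀▀▀▀▀╵" else " ░▒▓██████████▀" := by
  unfold pvFormatLine
  rw [show PySem.Str.pyGet? " ░▒▓██████████▀R3" (-2) = some 'R' from by decide]
  rw [show PySem.Str.pyGet? " ░▒▓██████████▀R3" (-1) = some '3' from by decide]
  dsimp only
  rw [if_pos (show (('R' == 'L' || 'R' == 'R') && PySem.Chars.isdigit '3') = true from by decide)]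
  rw [show ((('3'.toNat : Int)) - 48 : Int) = (3 : Int) from by decide]
  rw [if_pos (show (1:Int) ≤ 3 ∧ (3:Int) ≤ pvMAX_FINGERS from by decide)]
  rw [if_neg (show ¬ (('R' == 'L') = true) from by decide)]
  rw [if_neg (show ¬ (('R' == 'L') = true) from by decide)]
  by_cases h : rh ≥ (3 : Int)
  · rw [if_pos h, if_pos h]
    decide
  · rw [if_neg h, if_neg h]
    decide

theorem pvLineA_9 (lh rh : Int) :
    pvG lh rh "         ▀▀▀▀▀R4" = if rh ≥ 4 then "         ▀▀▀▀▀▀▀▀▀╵" else "         ▀▀▀▀▀" := by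
  unfold pvG
  by_cases h : rh ≥ (4 : Int)
  · simp only [h, if_true]
    rw [pvStrReplaceNoOcc' _ "L1" _ (by decide) (by decide)]
    rw [pvStrReplaceNoOcc' _ "L2" _ (by decide) (by decide)]
    rw [pvStrReplaceNoOcc' _ "L3" _ (by decide) (by decide)]
    rw [pvStrReplaceNoOcc' _ "L4" _ (by decide) (by decide)]
    rw [pvStrReplaceNoOcc' _ "R1" _ (by decide) (by decide)]
    rw [pvStrReplaceNoOcc' _ "R2" _ (by decide) (by decide)]
    rw [pvStrReplaceNoOcc' _ "R3" _ (by decide) (by decide)]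
    rw [show PySem.Str.replace "         ▀▀▀▀▀R4" "R4" pvRH_FINGER = "         ▀▀▀▀▀▀▀▀▀╵" from by decide]
  · simp only [h, if_false]
    rw [pvStrReplaceNoOcc' _ "L1" _ (by decide) (by decide)]
    rw [pvStrReplaceNoOcc' _ "L2" _ (by decide) (by decide)]
    rw [pvStrReplaceNoOcc' _ "L3" _ (by decide) (by decide)]
    rw [pvStrReplaceNoOcc' _ "L4" _ (by decide) (by decide)]
    rw [pvStrReplaceNoOcc' _ "R1" _ (by decide) (by decide)]
    rw [pvStrReplaceNoOcc' _ "R2" _ (by decide) (by decide)]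
    rw [pvStrReplaceNoOcc' _ "R3" _ (by decide) (by decide)]
    rw [show PySem.Str.replace "         ▀▀▀▀▀R4" "R4" "" = "         ▀▀▀▀▀" from by decide]

theorem pvLineB_9 (lh rh : Int) :
    pvFormatLine lh rh "         ▀▀▀▀▀R4" = if rh ≥ 4 then "         ▀▀▀▀▀▀▀▀▀╵" else "         ▀▀▀▀▀" := by
  unfold pvFormatLine
  rw [show PySem.Str.pyGet? "         ▀▀▀▀▀R4" (-2) = some 'R' from by decide]
  rw [show PySem.Str.pyGet? "         ▀▀▀▀▀R4" (-1) = some '4' from by decide]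
  dsimp only
  rw [if_pos (show (('R' == 'L' || 'R' == 'R') && PySem.Chars.isdigit '4') = true from by decide)]
  rw [show ((('4'.toNat : Int)) - 48 : Int) = (4 : Int) from by decide]
  rw [if_pos (show (1:Int) ≤ 4 ∧ (4:Int) ≤ pvMAX_FINGERS from by decide)]
  rw [if_neg (show ¬ (('R' == 'L') = true) from by decide)]
  rw [if_neg (show ¬ (('R' == 'L') = true) from by decide)]
  by_cases h : rh ≥ (4 : Int)
  · rw [if_pos h, if_pos h]
    decide
  · rw [if_neg h, if_neg h]
    decide

theorem pvA_eq (lh rh : Int) : format_player lh rh = PySem.Str.join "\n" (pvLINES.map (pvG lh rh)) := by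
  unfold format_player
  rw [show PySem.List.pyRange 1 (pvMAX_FINGERS + 1) 1 = [1, 2, 3, 4] from by decide]
  simp only [List.foldl]
  rw [show PySem.Str.join "" ["L", PySem.Int.toStr 1] = "L1" from by decide]
  rw [show PySem.Str.join "" ["L", PySem.Int.toStr 2] = "L2" from by decide]
  rw [show PySem.Str.join "" ["L", PySem.Int.toStr 3] = "L3" from by decide]
  rw [show PySem.Str.join "" ["L", PySem.Int.toStr 4] = "L4" from by decide]
  rw [show PySem.Str.join "" ["R", PySem.Int.toStr 1] = "R1" from by decide]
  rw [show PySem.Str.join "" ["R", PySem.Int.toStr 2] = "R2" from by decide]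
  rw [show PySem.Str.join "" ["R", PySem.Int.toStr 3] = "R3" from by decide]
  rw [show PySem.Str.join "" ["R", PySem.Int.toStr 4] = "R4" from by decide]
  rw [pvHJoin]
  rw [pvStrReplaceJoin _ "L1" _ (by decide) (by decide)]
  rw [pvStrReplaceJoin _ "L2" _ (by decide) (by decide)]
  rw [pvStrReplaceJoin _ "L3" _ (by decide) (by decide)]
  rw [pvStrReplaceJoin _ "L4" _ (by decide) (by decide)]
  rw [pvStrReplaceJoin _ "R1" _ (by decide) (by decide)]
  rw [pvStrReplaceJoin _ "R2" _ (by decide) (by decide)]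
  rw [pvStrReplaceJoin _ "R3" _ (by decide) (by decide)]
  rw [pvStrReplaceJoin _ "R4" _ (by decide) (by decide)]
  simp only [List.map_map]
  rfl

theorem pvB_eq (lh rh : Int) : format_player_alt lh rh = PySem.Str.join "\n" (pvLINES.map (pvFormatLine lh rh)) := by
  unfold format_player_alt
  rw [pvHJoin, pvStrSplitJoin pvLINES (by decide) (by decide)]
  simp only [Option.getD]
  rw [PySem.List.foldl_append_singleton_eq_map]
  simp

-- ===== VERDICT (by name: the statement is the Claim_ definition above) =====
theorem format_player_spec : Claim_equal_format_player := by
  intro lh rh _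
  unfold Spec_format_player
  rw [pvA_eq, pvB_eq]
  simp only [pvLINES, List.map]
  rw [pvLineA_0, pvLineA_1, pvLineA_2, pvLineA_3, pvLineA_4, pvLineA_5, pvLineA_6, pvLineA_7, pvLineA_8, pvLineA_9,
      pvLineB_0, pvLineB_1, pvLineB_2, pvLineB_3, pvLineB_4, pvLineB_5, pvLineB_6, pvLineB_7, pvLineB_8, pvLineB_9]
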